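-- pv_equiv track=rewrite | github.com/SaiSudhaV/coding_platforms | valid_report.py | valid_report
-- ===== SOURCE A (Python) =====
-- def valid_report(s, n):
--     tem, flag = None, True
--     for i in s:
--         if i == 'T':
--             if tem != 'H':
--                 flag = False
--                 break
--             else:
--                 tem = None
--         elif i == "H":
--             if tem:
--                 flag = False
--                 break
--             else:
--                 tem = "H"
--     return "Valid" if flag and not tem else "Invalid"
-- ===== SOURCE B (Python) =====
-- def valid_report(s, n):
--     f = ''.join(c for c in s if c in 'HT')
--     return 'Valid' if f == 'HT' * (len(f) // 2) else 'Invalid'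
-- ===== Notes on version B (the rewrite author's own statement) =====
-- stated objective: simpler
-- what changed: Replaces the single-pass pending-'H' state machine with early break by a filter of the H/T characters followed by one bulk comparison against the alternating pattern 'HT' repeated.
import Mathlib
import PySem

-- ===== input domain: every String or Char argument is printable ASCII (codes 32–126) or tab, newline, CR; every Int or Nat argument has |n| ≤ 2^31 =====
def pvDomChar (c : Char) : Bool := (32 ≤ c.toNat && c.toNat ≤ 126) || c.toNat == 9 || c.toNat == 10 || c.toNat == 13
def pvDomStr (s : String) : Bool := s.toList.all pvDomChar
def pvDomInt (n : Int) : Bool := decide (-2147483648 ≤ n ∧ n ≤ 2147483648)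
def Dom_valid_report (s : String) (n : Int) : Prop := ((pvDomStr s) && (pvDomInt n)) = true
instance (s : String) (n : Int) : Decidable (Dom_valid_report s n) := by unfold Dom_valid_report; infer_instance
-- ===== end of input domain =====

-- B replaces A's pending-'H' state machine (with early break) by a filter of the H/T
-- characters plus one bulk comparison against the repeated pattern "HT" (objective: simpler).


-- ===== PORT A =====
-- the for-loop with its (tem, flag) state; returning with flag = false is the early `break`
def validLoopA : List Char → Option String → (Option String × Bool)
  | [], tem => (tem, true)
  | c :: cs, tem =>
    if c = 'T' then
      if tem ≠ some "H" then (tem, false) else validLoopA cs none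
    else if c = 'H' then
      if tem.isSome then (tem, false) else validLoopA cs (some "H")
    else validLoopA cs tem

def valid_report (s : String) (n : Int) : String :=
  let r := validLoopA s.toList none
  if r.2 ∧ r.1 = none then "Valid" else "Invalid"

-- ===== PORT B =====
def valid_report_alt (s : String) (n : Int) : String :=
  let f := s.toList.filter (fun c => decide (c = 'H' ∨ c = 'T'))
  if f = List.flatten (List.replicate (f.length / 2) ['H', 'T']) then "Valid" else "Invalid"

-- ===== PRECONDITION & SPEC =====
def Spec_valid_report (s : String) (n : Int) (out : String) : Prop := out = valid_report_alt s n
instance (s : String) (n : Int) (out : String) : Decidable (Spec_valid_report s n out) := by unfold Spec_valid_report; infer_instance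

-- ===== CLAIM (what is proved, stated in full; the proofs are below) =====
def Claim_equal_valid_report : Prop := ∀ (s : String) (n : Int), Dom_valid_report s n → Spec_valid_report s n (valid_report s n)

-- ===== LEMMAS AND PROOFS =====

-- alternating-pattern checker, used only by the proofs as a bridge between the two ports
def isPat : List Char → Bool
  | [] => true
  | [_] => false
  | c0 :: c1 :: rest => decide (c0 = 'H') && decide (c1 = 'T') && isPat rest

-- the state-machine meaning of a pending 'H': remainder must be 'T' then alternating
def isPatT : List Char → Bool
  | [] => false
  | c :: rest => decide (c = 'T') && isPat rest

theorem isPat_cons_H (f : List Char) : isPat ('H' :: f) = isPatT f := by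
  cases f <;> simp [isPat, isPatT]

theorem isPat_cons_T (f : List Char) : isPat ('T' :: f) = false := by
  cases f <;> simp [isPat]

-- A's loop, from either reachable state, accepts exactly isPat / isPatT of the filtered H/T subsequence
theorem loopA_char (cs : List Char) :
    (decide ((validLoopA cs none).2 = true ∧ (validLoopA cs none).1 = none)
      = isPat (cs.filter (fun c => decide (c = 'H' ∨ c = 'T')))) ∧
    (decide ((validLoopA cs (some "H")).2 = true ∧ (validLoopA cs (some "H")).1 = none)
      = isPatT (cs.filter (fun c => decide (c = 'H' ∨ c = 'T')))) := by
  induction cs with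
  | nil => simp [validLoopA, isPat, isPatT]
  | cons c cs ih =>
    by_cases hT : c = 'T'
    · subst hT
      refine ⟨?_, ?_⟩
      · simp [validLoopA, isPat_cons_T, List.filter]
      · simpa [validLoopA, isPatT, List.filter] using ih.1
    · by_cases hH : c = 'H'
      · subst hH
        refine ⟨?_, ?_⟩
        · simpa [validLoopA, isPat_cons_H, List.filter] using ih.2
        · simp [validLoopA, isPatT, List.filter]
      · have hfil : (c :: cs).filter (fun c => decide (c = 'H' ∨ c = 'T'))
            = cs.filter (fun c => decide (c = 'H' ∨ c = 'T')) := by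
          simp [List.filter, hT, hH]
        refine ⟨?_, ?_⟩
        · rw [hfil]; simpa [validLoopA, hT, hH] using ih.1
        · rw [hfil]; simpa [validLoopA, hT, hH] using ih.2

-- the checker accepts exactly B's bulk pattern
theorem isPat_iff : ∀ f : List Char,
    isPat f = decide (f = List.flatten (List.replicate (f.length / 2) ['H', 'T']))
  | [] => by simp [isPat]
  | [c] => by simp [isPat]
  | c0 :: c1 :: rest => by
    have hl : (c0 :: c1 :: rest).length / 2 = rest.length / 2 + 1 := by
      simp [List.length]; omega
    have ih := isPat_iff rest
    rw [hl]
    simp [isPat, List.replicate_succ, ih, Bool.and_assoc]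

-- ===== VERDICT (by name: the statement is the Claim_ definition above) =====
theorem valid_report_spec : Claim_equal_valid_report := by
  intro s n _
  unfold Spec_valid_report valid_report valid_report_alt
  have h1 := (loopA_char s.toList).1
  rw [isPat_iff] at h1
  have : ((validLoopA s.toList none).2 = true ∧ (validLoopA s.toList none).1 = none)
      ↔ (s.toList.filter (fun c => decide (c = 'H' ∨ c = 'T'))
          = List.flatten (List.replicate ((s.toList.filter (fun c => decide (c = 'H' ∨ c = 'T'))).length / 2) ['H', 'T'])) := by
    have := congrArg (fun b => b = true) h1
    simpa using this
  simp only []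
  split_ifs with ha hb hb
  · rfl
  · exact absurd (this.mp ha) hb
  · exact absurd (this.mpr hb) ha
  · rfl
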